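-- pv_equiv track=rewrite | github.com/sangka9/codingPractice | programmers/SK_ICT_2_1.py | solution
-- ===== SOURCE A (Python) =====
-- from itertools import combinations
--
-- def solution(goods):
--     answer = []
--
--     for i in range(len(goods)) :
--         items = list(goods[i]) # 문자 선정
--         onlyOne = [] # 고유검색어 목록
--
--         for j in range(1, len(items)): # 문자 조합
--             combi = list(map(''.join, combinations(items, j)))
--
--             for k in range(len(combi)) :
--                 matchList = list(filter(lambda x: combi[k] in x, goods))
--                 if len(matchList) == 1 and goods[i] in matchList : # 고유검색어인 경우
--                     onlyOne.append(combi[k])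
--
--             if len(onlyOne) > 0 :
--                 onlyOne = list(set(onlyOne)) # 중복제거
--                 onlyOne.sort() # 정렬
--                 answer.append(" ".join(onlyOne)) #문자열 합친 후 정답에 추가
--                 break
--
--
--         if len(onlyOne) == 0 :
--             answer.append("None")
--
--
--     return answer
-- ===== SOURCE B (Python) =====
-- def solution(goods):
--     # substring -> number of goods containing it (each good counted once per distinct substring)
--     counter = {}
--     for g in goods:
--         subs = {g[s:s + j] for j in range(1, len(g) + 1) for s in range(len(g) - j + 1)}
--         for sub in subs:
--             counter[sub] = counter.get(sub, 0) + 1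
--     answer = []
--     for w in goods:
--         res = "None"
--         for j in range(1, len(w)):
--             cands = {w[s:s + j] for s in range(len(w) - j + 1)}
--             uniq = sorted(c for c in cands if counter.get(c, 0) == 1)
--             if uniq:
--                 res = " ".join(uniq)
--                 break
--         answer.append(res)
--     return answer
-- ===== Notes on version B (the rewrite author's own statement) =====
-- stated objective: faster
-- what changed: Replaces per-word enumeration of all character combinations (subsequences) with repeated rescans of goods by a prebuilt substring-frequency index: only contiguous substrings can qualify (the unique good must be the word itself), so B counts, once, for each distinct substring how many goods contain it, then per word scans substring lengths 1..len-1 and takes the first length with count-1 substrings.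
import Mathlib
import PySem

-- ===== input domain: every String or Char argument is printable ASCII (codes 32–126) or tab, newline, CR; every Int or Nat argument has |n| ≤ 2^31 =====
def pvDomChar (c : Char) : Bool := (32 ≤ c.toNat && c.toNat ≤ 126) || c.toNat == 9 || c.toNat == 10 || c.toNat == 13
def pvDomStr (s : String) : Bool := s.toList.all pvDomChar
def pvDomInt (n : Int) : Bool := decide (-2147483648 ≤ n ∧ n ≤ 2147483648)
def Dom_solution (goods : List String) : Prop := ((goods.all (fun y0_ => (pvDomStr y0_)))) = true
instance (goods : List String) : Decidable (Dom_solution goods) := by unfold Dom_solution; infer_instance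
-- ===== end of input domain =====

-- B replaces A's per-word enumeration of all character combinations (with a rescan of
-- goods for each combination) by a prebuilt substring-frequency index; measurably faster.

-- ===== PORT A =====
-- the j-loop of A ('for j in range(1, len(items))' with its break); 'onlyOne' and
-- 'answer' are A's accumulators; the break is the non-recursive branch.
def solutionAJ (goods : List String) (w : String) (js : List Int)
    (onlyOne : List String) (answer : List String) : List String :=
  match js with
  | [] => if onlyOne.length = 0 then answer ++ ["None"] else answer
  | j :: rest =>
      -- combi = list(map(''.join, combinations(items, j))); the k-loop appends to onlyOne
      let onlyOne := (PySem.List.combinations w.toList j.toNat).foldl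
        (fun acc ch =>
          let combi := String.ofList ch
          let matchList := goods.filter (fun x => PySem.Str.isIn combi x)
          if matchList.length == 1 && matchList.contains w then acc ++ [combi] else acc)
        onlyOne
      if onlyOne.length > 0 then
        answer ++ [PySem.Str.join " "
          (PySem.List.sorted (PySem.Set.ofList onlyOne) (fun x => x) false)]
      else solutionAJ goods w rest onlyOne answer

def solution (goods : List String) : List String :=
  (PySem.List.pyRange 0 (PySem.List.len goods)).foldl
    (fun answer i =>
      let item := PySem.List.pyGetD goods i ""
      solutionAJ goods item (PySem.List.pyRange 1 (PySem.Str.len item)) [] answer)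
    []

-- ===== PORT B =====
-- the word's length-j substrings: [w[s:s+j] for s in range(len(w)-j+1)]
def candsRaw (w : String) (j : Int) : List String :=
  (PySem.List.pyRange 0 (PySem.Str.len w - j + 1)).map
    (fun s => PySem.Str.slice w (some s) (some (s + j)))

-- subs = {g[s:s+j] for j in range(1, len(g)+1) for s in range(len(g)-j+1)}
def altSubs (g : String) : PySem.Set String :=
  PySem.Set.ofList ((PySem.List.pyRange 1 (PySem.Str.len g + 1)).flatMap (candsRaw g))

-- counter[sub] = counter.get(sub, 0) + 1 over each good's distinct substrings
def altIndex (goods : List String) : PySem.Dict String Int :=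
  goods.foldl
    (fun counter g => (altSubs g).foldl (fun c sub => c.modify sub 0 (· + 1)) counter)
    PySem.Dict.empty

-- the per-word loop over lengths j with its break
def altWord (counter : PySem.Dict String Int) (w : String) : List Int → String
  | [] => "None"
  | j :: rest =>
      let uniq := PySem.List.sorted
        ((PySem.Set.ofList (candsRaw w j)).filter (fun c => counter.getD c 0 == 1))
        (fun x => x) false
      if uniq.length > 0 then PySem.Str.join " " uniq else altWord counter w rest

def solution_alt (goods : List String) : List String :=
  let counter := altIndex goods
  goods.foldl
    (fun answer w => answer ++ [altWord counter w (PySem.List.pyRange 1 (PySem.Str.len w))])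
    []

-- ===== PRECONDITION & SPEC =====
def Spec_solution (goods : List String) (out : List String) : Prop := out = solution_alt goods
instance (goods : List String) (out : List String) : Decidable (Spec_solution goods out) := by unfold Spec_solution; infer_instance

-- ===== CLAIM (what is proved, stated in full; the proofs are below) =====
def Claim_equal_solution : Prop := ∀ (goods : List String), Dom_solution goods → Spec_solution goods (solution goods)

-- ===== LEMMAS AND PROOFS =====

-- A's inner filter condition, named for the proofs (reducible so `rw` sees through it)
abbrev condA (goods : List String) (w : String) (ch : List Char) : Bool :=
  (goods.filter (fun x => PySem.Str.isIn (String.ofList ch) x)).length == 1 &&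
  (goods.filter (fun x => PySem.Str.isIn (String.ofList ch) x)).contains w

-- membership in the length-j substring list
theorem mem_candsRaw (w : String) (j : Int) (h1 : 1 ≤ j) (c : String) :
    c ∈ candsRaw w j ↔ c.toList <:+: w.toList ∧ (c.toList.length : Int) = j := by
  unfold candsRaw
  simp only [List.mem_map]
  constructor
  · rintro ⟨s, hs, rfl⟩
    have hsr := PySem.List.mem_pyRange_one.mp hs
    rw [PySem.Str.len_eq] at hsr
    have h0s : 0 ≤ s := hsr.1
    have hslice : (PySem.Str.slice w (some s) (some (s + j))).toList
        = ((w.toList.drop s.toNat).take ((s + j).toNat - s.toNat)) := by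
      rw [PySem.Str.toList_slice, PySem.Chars.slice_eq_listSlice,
        PySem.List.slice_toNat _ h0s (by omega)]
    have hj' : (s + j).toNat - s.toNat = j.toNat := by omega
    rw [hslice, hj']
    refine ⟨((w.toList.drop s.toNat).take_prefix j.toNat).isInfix.trans
      (w.toList.drop_suffix s.toNat).isInfix, ?_⟩
    rw [List.length_take, List.length_drop]
    omega
  · rintro ⟨⟨p, t, hpt⟩, hlen⟩
    refine ⟨(p.length : Int), ?_, ?_⟩
    · rw [PySem.List.mem_pyRange_one, PySem.Str.len_eq]
      have : p.length + c.toList.length + t.length = w.toList.length := by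
        rw [← hpt]; simp [List.length_append]; omega
      omega
    · have hslice : (PySem.Str.slice w (some (p.length : Int)) (some ((p.length : Int) + j))).toList
        = ((w.toList.drop p.length).take j.toNat) := by
        rw [PySem.Str.toList_slice, PySem.Chars.slice_eq_listSlice,
          PySem.List.slice_toNat _ (by positivity) (by omega)]
        congr 1
        omega
      apply String.toList_inj.mp
      rw [hslice, ← hpt, List.append_assoc, List.drop_left,
        List.take_left' (by omega)]

-- membership in a good's full distinct-substring set
theorem mem_altSubs (g c : String) :
    c ∈ altSubs g ↔ c.toList <:+: g.toList ∧ c.toList ≠ [] := by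
  unfold altSubs
  rw [PySem.Set.mem_ofList]
  simp only [List.mem_flatMap]
  constructor
  · rintro ⟨j, hj, hc⟩
    have hjr := PySem.List.mem_pyRange_one.mp hj
    have h := (mem_candsRaw g j hjr.1 c).mp hc
    refine ⟨h.1, ?_⟩
    intro hnil
    rw [hnil] at h
    simp at h
    omega
  · rintro ⟨hinf, hne⟩
    have hle : c.toList.length ≤ g.toList.length := hinf.sublist.length_le
    have hpos : c.toList.length ≠ 0 := by simpa using hne
    refine ⟨(c.toList.length : Int), ?_, ?_⟩
    · rw [PySem.List.mem_pyRange_one, PySem.Str.len_eq]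
      omega
    · exact (mem_candsRaw g _ (by omega) c).mpr ⟨hinf, rfl⟩

-- the index counts, for each nonempty string, the goods that contain it
theorem altIndex_getD (goods : List String) (c : String) (hc : c.toList ≠ []) :
    (altIndex goods).getD c 0 = (goods.countP (fun g => PySem.Str.isIn c g) : Int) := by
  have aux : ∀ (gs : List String) (d : PySem.Dict String Int),
      (gs.foldl (fun counter g =>
          (altSubs g).foldl (fun cc sub => cc.modify sub 0 (· + 1)) counter) d).getD c 0
        = d.getD c 0 + (gs.countP (fun g => PySem.Str.isIn c g) : Int) := by
    intro gs
    induction gs with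
    | nil => simp
    | cons g tl ih =>
      intro d
      rw [List.foldl_cons, ih, PySem.Dict.getD_foldl_modify_add_one]
      have hcnt : List.count c (altSubs g) = if PySem.Str.isIn c g then 1 else 0 := by
        by_cases h : c ∈ altSubs g
        · rw [List.count_eq_one_of_mem (by unfold altSubs; exact PySem.Set.nodup_ofList _) h,
            if_pos ((PySem.Str.isIn_iff_infix c g).mpr ((mem_altSubs g c).mp h).1)]
        · rw [List.count_eq_zero_of_not_mem h, if_neg]
          intro hin
          exact h ((mem_altSubs g c).mpr ⟨(PySem.Str.isIn_iff_infix c g).mp hin, hc⟩)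
      rw [List.countP_cons, hcnt]
      push_cast
      split_ifs <;> ring
  unfold altIndex
  rw [aux goods PySem.Dict.empty, PySem.Dict.getD_empty, zero_add]

-- the strings A keeps at level j are exactly B's count-1 substrings of length j
theorem level_mem (goods : List String) (w : String) (hw : w ∈ goods) (j : Int)
    (hj1 : 1 ≤ j) (x : String) :
    x ∈ ((PySem.List.combinations w.toList j.toNat).filter (condA goods w)).map String.ofList ↔
    x ∈ ((PySem.Set.ofList (candsRaw w j)).filter
          (fun c => (altIndex goods).getD c 0 == 1)) := by
  rw [List.mem_filter, PySem.Set.mem_ofList]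
  simp only [List.mem_map, List.mem_filter]
  constructor
  · rintro ⟨ch, ⟨hch, hcond⟩, rfl⟩
    obtain ⟨hsub, hlen⟩ := (PySem.List.mem_combinations_iff _ _ _).mp hch
    rw [condA, Bool.and_eq_true, beq_iff_eq, List.contains_iff_mem,
      ← List.countP_eq_length_filter, List.mem_filter] at hcond
    obtain ⟨hcnt, _, hin⟩ := hcond
    have hinf : (String.ofList ch).toList <:+: w.toList := by
      rw [String.toList_ofList]
      rw [PySem.Str.isIn_iff_infix, String.toList_ofList] at hin
      exact hin
    have hne : (String.ofList ch).toList ≠ [] := by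
      rw [String.toList_ofList]
      intro h
      rw [h] at hlen
      simp at hlen
      omega
    refine ⟨(mem_candsRaw w j hj1 _).mpr ⟨hinf, by rw [String.toList_ofList, hlen]; omega⟩, ?_⟩
    rw [beq_iff_eq, altIndex_getD goods _ hne]
    exact_mod_cast hcnt
  · rintro ⟨hcand, hget⟩
    obtain ⟨hinf, hlen⟩ := (mem_candsRaw w j hj1 x).mp hcand
    have hne : x.toList ≠ [] := by
      intro h
      rw [h] at hlen
      simp at hlen
      omega
    rw [beq_iff_eq, altIndex_getD goods x hne] at hget
    have hcnt : goods.countP (fun g => PySem.Str.isIn x g) = 1 := by exact_mod_cast hget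
    refine ⟨x.toList, ⟨(PySem.List.mem_combinations_iff _ _ _).mpr ⟨hinf.sublist, by omega⟩, ?_⟩,
      String.ofList_toList⟩
    rw [condA, Bool.and_eq_true, beq_iff_eq, List.contains_iff_mem,
      ← List.countP_eq_length_filter, List.mem_filter, String.ofList_toList]
    exact ⟨hcnt, hw, (PySem.Str.isIn_iff_infix x w).mpr hinf⟩

-- the j-loop of A equals the j-loop of B (aligned break)
theorem solutionAJ_eq_altWord (goods : List String) (w : String) (hw : w ∈ goods)
    (js : List Int) (hjs : ∀ j ∈ js, 1 ≤ j) (answer : List String) :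
    solutionAJ goods w js [] answer = answer ++ [altWord (altIndex goods) w js] := by
  induction js generalizing answer with
  | nil => simp [solutionAJ, altWord]
  | cons j rest ih =>
    have hj1 : 1 ≤ j := hjs j (List.mem_cons_self ..)
    simp only [solutionAJ, altWord]
    rw [PySem.List.foldl_append_if (condA goods w) (fun ch => String.ofList ch), List.nil_append]
    set LA := ((PySem.List.combinations w.toList j.toNat).filter (condA goods w)).map
      (fun ch => String.ofList ch) with hLAdef
    set FB := ((PySem.Set.ofList (candsRaw w j)).filter
      (fun c => (altIndex goods).getD c 0 == 1)) with hFBdef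
    have hmem : ∀ x, x ∈ (PySem.Set.ofList LA) ↔ x ∈ FB := by
      intro x
      rw [PySem.Set.mem_ofList]
      exact level_mem goods w hw j hj1 x
    have hperm : (PySem.Set.ofList LA).Perm FB :=
      (List.perm_ext_iff_of_nodup (PySem.Set.nodup_ofList _)
        ((PySem.Set.nodup_ofList _).filter _)).mpr hmem
    have hsorted : PySem.List.sorted (PySem.Set.ofList LA) (fun x => x) false
        = PySem.List.sorted FB (fun x => x) false :=
      PySem.List.sorted_eq_sorted_of_perm _ _ _ (fun _ _ h => h) hperm
    by_cases hLA : LA = []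
    · have hFB : FB = [] := by
        rw [List.eq_nil_iff_forall_not_mem]
        intro a ha
        have h := (hmem a).mpr ha
        rw [PySem.Set.mem_ofList, hLA] at h
        exact absurd h (List.not_mem_nil)
      have hsnil : PySem.List.sorted FB (fun x => x) false = [] :=
        (PySem.List.sorted_eq_nil_iff FB (fun x => x) false).mpr hFB
      rw [hLA, hsnil, if_neg (by simp), if_neg (by simp)]
      exact ih (fun j hj => hjs j (List.mem_cons_of_mem _ hj)) answer
    · have hFBne : FB ≠ [] := by
        intro hFB
        obtain ⟨a, ha⟩ := List.exists_mem_of_ne_nil LA hLA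
        have h := (hmem a).mp ((PySem.Set.mem_ofList LA a).mpr ha)
        rw [hFB] at h
        exact absurd h (List.not_mem_nil)
      rw [if_pos (by exact List.length_pos_of_ne_nil hLA),
        if_pos (by
          have := PySem.List.sorted_eq_nil_iff FB (fun x => x) false
          have hne : PySem.List.sorted FB (fun x => x) false ≠ [] := fun h => hFBne (this.mp h)
          exact List.length_pos_of_ne_nil hne)]
      rw [hsorted]

-- ===== VERDICT (by name: the statement is the Claim_ definition above) =====
theorem solution_spec : Claim_equal_solution := by
  intro goods _
  unfold Spec_solution solution solution_alt
  rw [PySem.List.foldl_pyRange_zero_pyGetD goods ""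
    (fun answer item => solutionAJ goods item (PySem.List.pyRange 1 (PySem.Str.len item)) [] answer) []]
  exact PySem.List.foldl_congr_mem goods _ _ [] (fun acc w hw =>
    solutionAJ_eq_altWord goods w hw _ (fun j hj => (PySem.List.mem_pyRange_one.mp hj).1) acc)
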